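-- pv_equiv track=rewrite | github.com/Namhunk/OJ | 프로그래머스/0/181921. 배열 만들기 2/배열 만들기 2.py | solution
-- ===== SOURCE A (Python) =====
-- from collections import deque
--
-- def solution(l, r):
--     answer = []
--     arr = []
--     que = deque(['5'])
--     while que:
--         num = que.popleft()
--         if l <= int(num) <= r: answer.append(int(num))
--
--         if int(num+'0') <= r: que.append(num+'0')
--         if int(num+'5') <= r: que.append(num+'5')
--
--     if not len(answer): answer.append(-1)
--     return answer
-- ===== SOURCE B (Python) =====
-- def solution(l, r):
--     answer = []
--     k = 1
--     while True:
--         num = 5 * int(format(k, 'b'))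
--         if num > r:
--             break
--         if l <= num:
--             answer.append(num)
--         k += 1
--     if not answer:
--         answer.append(-1)
--     return answer
-- ===== Notes on version B (the rewrite author's own statement) =====
-- stated objective: alternative
-- what changed: Replaced the BFS deque over digit strings by a direct counter loop: the k-th candidate is 5*int(bin(k)) which is strictly increasing, so B appends in-range candidates and breaks at the first one exceeding r.
import Mathlib
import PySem

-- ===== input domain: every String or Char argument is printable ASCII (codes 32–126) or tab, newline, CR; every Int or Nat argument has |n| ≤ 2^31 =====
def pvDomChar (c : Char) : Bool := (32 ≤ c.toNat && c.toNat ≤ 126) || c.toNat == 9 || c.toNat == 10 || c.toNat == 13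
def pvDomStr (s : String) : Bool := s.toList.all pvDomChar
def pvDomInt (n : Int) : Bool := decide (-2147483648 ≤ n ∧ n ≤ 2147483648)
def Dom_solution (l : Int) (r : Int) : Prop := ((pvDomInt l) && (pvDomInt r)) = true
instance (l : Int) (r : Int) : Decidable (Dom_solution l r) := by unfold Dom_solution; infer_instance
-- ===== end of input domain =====

-- B replaces A's BFS deque of digit strings by a counter loop over the strictly
-- increasing sequence 5*int(bin k) with an early break (objective: alternative algorithm).

-- ===== PORT A =====
-- A's queue strings are canonical digit strings over {0,5} starting with '5';
-- they are ported by their integer values: '5' → 5, s+'0' → num*10, s+'5' → num*10+5,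
-- int(s) → num — exact, since int() of such a string is that value.
-- The while-loop is ported with a fuel guard for totality; on Dom (|r| ≤ 2^31) the
-- queue empties long before the fuel 2^31+2 runs out, so the guard never fires there.
def solutionLoop (l : Int) (r : Int) (fuel : Nat) (que : List Int) (answer : List Int) : List Int :=
  match que with
  | [] => answer
  | num :: rest =>
      if _h : fuel = 0 then answer
      else
        solutionLoop l r (fuel - 1)
          ((if num * 10 + 5 ≤ r then
              (if num * 10 ≤ r then rest ++ [num * 10] else rest) ++ [num * 10 + 5]
            else
              (if num * 10 ≤ r then rest ++ [num * 10] else rest)))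
          (if l ≤ num ∧ num ≤ r then answer ++ [num] else answer)
termination_by fuel
decreasing_by omega

def solution (l : Int) (r : Int) : List Int :=
  let answer := solutionLoop l r (2 ^ 31 + 2) [5] []
  if answer = [] then [-1] else answer

-- ===== PORT B =====
-- int(format(k,'b')): the decimal reading of k's binary representation.
def binval (n : Nat) : Int :=
  if n = 0 then 0 else 10 * binval (n / 2) + ((n % 2 : Nat) : Int)
termination_by n
decreasing_by omega

-- needed by solutionAltGo's termination: the candidate value dominates its index
theorem binval_ge (n : Nat) : (n : Int) ≤ binval n := by
  induction n using Nat.strong_induction_on with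
  | _ n ih =>
    rw [binval]
    split
    · omega
    · have h2 : n / 2 < n := by omega
      have := ih (n / 2) h2
      omega

-- `num > r` is `r < num`; `num` (= 5 * binval k) is written inline.
def solutionAltGo (l : Int) (r : Int) (k : Nat) (answer : List Int) : List Int :=
  if _h : r < 5 * binval k then answer
  else solutionAltGo l r (k + 1)
        (if l ≤ 5 * binval k then answer ++ [5 * binval k] else answer)
termination_by (r + 1 - k).toNat
decreasing_by
  have := binval_ge k
  omega

def solution_alt (l : Int) (r : Int) : List Int :=
  let answer := solutionAltGo l r 1 []
  if answer = [] then [-1] else answer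

-- ===== PRECONDITION & SPEC =====
def Spec_solution (l : Int) (r : Int) (out : List Int) : Prop := out = solution_alt l r
instance (l : Int) (r : Int) (out : List Int) : Decidable (Spec_solution l r out) := by unfold Spec_solution; infer_instance

-- ===== CLAIM (what is proved, stated in full; the proofs are below) =====
def Claim_equal_solution : Prop := ∀ (l : Int) (r : Int), Dom_solution l r → Spec_solution l r (solution l r)

-- ===== LEMMAS AND PROOFS =====

theorem binval_zero : binval 0 = 0 := by rw [binval]; simp

theorem binval_one : binval 1 = 1 := by rw [binval]; norm_num [binval_zero]

theorem binval_even (k : Nat) : binval (2 * k) = 10 * binval k := by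
  rcases Nat.eq_zero_or_pos k with h | h
  · subst h; simp [binval_zero]
  · conv_lhs => rw [binval]
    have h0 : ¬ (2 * k = 0) := by omega
    have h1 : 2 * k / 2 = k := by omega
    have h2 : 2 * k % 2 = 0 := by omega
    simp [h0, h1, h2]

theorem binval_odd (k : Nat) : binval (2 * k + 1) = 10 * binval k + 1 := by
  conv_lhs => rw [binval]
  have h1 : (2 * k + 1) / 2 = k := by omega
  have h2 : (2 * k + 1) % 2 = 1 := by omega
  simp [h1, h2]

theorem binval_strict (a b : Nat) (ha : 1 ≤ a) (hab : a < b) : binval a < binval b := by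
  induction b using Nat.strong_induction_on generalizing a with
  | _ b ih =>
    have hb0 : ¬ (b = 0) := by omega
    have ha0 : ¬ (a = 0) := by omega
    conv_lhs => rw [binval]
    conv_rhs => rw [binval]
    simp only [ha0, hb0, if_false]
    rcases Nat.lt_or_ge (a / 2) (b / 2) with hlt | hge
    · rcases Nat.eq_or_lt_of_le ha with h1 | h2
      · -- a = 1, a/2 = 0
        have hz : a / 2 = 0 := by omega
        rw [hz, binval_zero]
        have hb2 : 1 ≤ b / 2 := by omega
        have := binval_ge (b / 2)
        omega
      · -- a ≥ 2
        have ha2 : 1 ≤ a / 2 := by omega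
        have hb2 : b / 2 < b := by omega
        have := ih (b / 2) hb2 (a / 2) ha2 hlt
        omega
    · have heq : a / 2 = b / 2 := by omega
      have : a % 2 < b % 2 := by omega
      rw [heq]; omega

theorem binval_mono (a b : Nat) (ha : 1 ≤ a) (hab : a ≤ b) : binval a ≤ binval b := by
  rcases Nat.eq_or_lt_of_le hab with h | h
  · subst h; exact le_refl _
  · exact le_of_lt (binval_strict a b ha h)

theorem range'_snoc (a n : Nat) : List.range' a (n + 1) = List.range' a n ++ [a + n] := by
  induction n generalizing a with
  | zero => simp [List.range']
  | succ n ih =>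
    rw [List.range'_succ, ih (a + 1), List.range'_succ]
    simp [Nat.add_assoc, Nat.add_comm 1 n]

-- accumulator lemma for B's loop
theorem go_acc (l r : Int) (k : Nat) (acc : List Int) :
    solutionAltGo l r k acc = acc ++ solutionAltGo l r k [] := by
  generalize hm : (r + 1 - k).toNat = m
  induction m using Nat.strong_induction_on generalizing k acc with
  | _ m ih =>
    conv_lhs => rw [solutionAltGo]
    conv_rhs => rw [solutionAltGo]
    by_cases hgt : r < 5 * binval k
    · rw [dif_pos hgt, dif_pos hgt]; simp
    · rw [dif_neg hgt, dif_neg hgt]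
      have hk : (k : Int) ≤ r := by have := binval_ge k; omega
      have hdec : (r + 1 - (k + 1 : Nat)).toNat < m := by omega
      rw [ih _ hdec (k + 1) _ rfl,
          ih _ hdec (k + 1) (if l ≤ 5 * binval k then [] ++ [5 * binval k] else []) rfl]
      split <;> simp

-- one unfolding of B's loop in the non-break case, with the filter pulled out
theorem go_step (l r : Int) (a : Nat) (h : 5 * binval a ≤ r) :
    solutionAltGo l r a []
      = (if l ≤ 5 * binval a then [5 * binval a] else []) ++ solutionAltGo l r (a + 1) [] := by
  conv_lhs => rw [solutionAltGo]
  rw [dif_neg (by omega)]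
  rw [go_acc]
  split <;> simp

-- invariant of A's BFS loop: when the queue holds the candidate values of the
-- consecutive indices a, a+1, …, a+n-1 (all ≤ r) and either the last index is 2a-1
-- (the frontier is full) or the next candidate already exceeds r (drain phase),
-- the loop produces exactly what B's counter loop produces from index a.
theorem loopA_inv (l r : Int) (fuel a n : Nat) (ans : List Int)
    (ha : 1 ≤ a) (hn : n ≤ a)
    (hall : ∀ k, a ≤ k → k < a + n → 5 * binval k ≤ r)
    (hphase : a + n = 2 * a ∨ r < 5 * binval (a + n))
    (hfuel : r.toNat + 2 ≤ fuel + a) :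
    solutionLoop l r fuel ((List.range' a n).map (fun k => 5 * binval k)) ans
      = ans ++ solutionAltGo l r a [] := by
  induction fuel using Nat.strong_induction_on generalizing a n ans with
  | _ fuel ih =>
    match n with
    | 0 =>
      have hr : r < 5 * binval a := by
        rcases hphase with h | h
        · omega
        · simpa using h
      rw [solutionAltGo, dif_pos hr]
      simp [solutionLoop]
    | n' + 1 =>
      -- head value ≤ r, hence a is small, hence fuel ≥ 1
      have hhead : 5 * binval a ≤ r := hall a (le_refl a) (by omega)
      have hale : (a : Int) ≤ r := by have := binval_ge a; omega
      have haN : a ≤ r.toNat := by omega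
      have hfz : ¬ (fuel = 0) := by omega
      have hq : (List.range' a (n' + 1)).map (fun k => 5 * binval k)
          = 5 * binval a :: (List.range' (a + 1) n').map (fun k => 5 * binval k) := by
        rw [List.range'_succ]; simp
      rw [hq, solutionLoop]
      rw [dif_neg hfz]
      have h2a : 5 * binval a * 10 = 5 * binval (2 * a) := by rw [binval_even]; ring
      have h2a1 : 5 * binval a * 10 + 5 = 5 * binval (2 * a + 1) := by rw [binval_odd]; ring
      have hans : (if l ≤ 5 * binval a ∧ 5 * binval a ≤ r then ans ++ [5 * binval a] else ans)
          = ans ++ (if l ≤ 5 * binval a then [5 * binval a] else []) := by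
        split <;> rename_i hc
        · rw [if_pos hc.1]
        · rw [if_neg (fun hl => hc ⟨hl, hhead⟩)]; simp
      rw [hans]
      rcases hphase with hph1 | hph2
      · -- full-frontier phase: a + n = 2a, so the next enqueued index is a + n'+1 = 2a
        have he1 : a + 1 + n' = 2 * a := by omega
        have he2 : a + 1 + (n' + 1) = 2 * a + 1 := by omega
        by_cases hp1 : 5 * binval a * 10 ≤ r
        · by_cases hp2 : 5 * binval a * 10 + 5 ≤ r
          · rw [if_pos hp2, if_pos hp1]
            have hq2 : ((List.range' (a + 1) n').map (fun k => 5 * binval k) ++ [5 * binval a * 10]) ++ [5 * binval a * 10 + 5]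
                = (List.range' (a + 1) (n' + 2)).map (fun k => 5 * binval k) := by
              rw [show n' + 2 = (n' + 1) + 1 from rfl, range'_snoc, range'_snoc]
              simp [he1, he2, h2a]
              omega
            rw [hq2, ih (fuel - 1) (by omega) (a + 1) (n' + 2) _ (by omega) (by omega)
              (by intro k hk1 hk2
                  rcases Nat.lt_or_ge k (2 * a) with hk | hk
                  · exact hall k (by omega) (by omega)
                  · rcases Nat.eq_or_lt_of_le hk with hk' | hk'
                    · rw [← hk']; omega
                    · have hke : k = 2 * a + 1 := by omega
                      rw [hke]; omega)
              (Or.inl (by omega)) (by omega)]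
            rw [go_step l r a hhead]
            simp
          · rw [if_neg hp2, if_pos hp1]
            have hq2 : (List.range' (a + 1) n').map (fun k => 5 * binval k) ++ [5 * binval a * 10]
                = (List.range' (a + 1) (n' + 1)).map (fun k => 5 * binval k) := by
              rw [range'_snoc]
              simp [he1, h2a]
            rw [hq2, ih (fuel - 1) (by omega) (a + 1) (n' + 1) _ (by omega) (by omega)
              (by intro k hk1 hk2
                  rcases Nat.lt_or_ge k (2 * a) with hk | hk
                  · exact hall k (by omega) (by omega)
                  · have hke : k = 2 * a := by omega
                    rw [hke]; omega)
              (Or.inr (by rw [he2]; omega)) (by omega)]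
            rw [go_step l r a hhead]
            simp
        · rw [if_neg (by omega), if_neg hp1]
          rw [ih (fuel - 1) (by omega) (a + 1) n' _ (by omega) (by omega)
            (fun k hk1 hk2 => hall k (by omega) (by omega))
            (Or.inr (by rw [he1]; omega)) (by omega)]
          rw [go_step l r a hhead]
          simp
      · -- drain phase: the next candidate exceeds r, and the children are even larger
        have hmono : 5 * binval (a + (n' + 1)) ≤ 5 * binval (2 * a) := by
          have := binval_mono (a + (n' + 1)) (2 * a) (by omega) (by omega)
          omega
        have hp1 : ¬ (5 * binval a * 10 ≤ r) := by omega
        rw [if_neg (by omega), if_neg hp1]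
        rw [ih (fuel - 1) (by omega) (a + 1) n' _ (by omega) (by omega)
          (fun k hk1 hk2 => hall k (by omega) (by omega))
          (Or.inr (by rw [show a + 1 + n' = a + (n' + 1) from by omega]; exact hph2)) (by omega)]
        rw [go_step l r a hhead]
        simp

theorem loops_agree (l r : Int) (hr : r ≤ 2 ^ 31) :
    solutionLoop l r (2 ^ 31 + 2) [5] [] = solutionAltGo l r 1 [] := by
  have hfz : ¬ ((2:Nat) ^ 31 + 2 = 0) := by positivity
  by_cases h5 : (5 : Int) ≤ r
  · have hb5 : 5 * binval 1 = 5 := by rw [binval_one]; ring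
    have hmain := loopA_inv l r (2 ^ 31 + 2) 1 1 [] (le_refl 1) (le_refl 1)
      (by intro k hk1 hk2
          have hke : k = 1 := by omega
          rw [hke, hb5]; omega)
      (Or.inl rfl)
      (by have : r.toNat ≤ 2 ^ 31 := by omega
          omega)
    have hq : (List.range' 1 1).map (fun k => 5 * binval k) = [5] := by
      simp [List.range'_succ, hb5]
    rw [hq] at hmain
    simpa using hmain
  · -- r < 5: A pops '5', appends nothing, pushes nothing; B breaks at once
    have hb5 : 5 * binval 1 = 5 := by rw [binval_one]; ring
    rw [solutionLoop, dif_neg hfz]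
    rw [if_neg (by omega), if_neg (by omega), if_neg (by omega)]
    rw [solutionLoop]
    rw [solutionAltGo, dif_pos (by rw [hb5]; omega)]

-- ===== VERDICT (by name: the statement is the Claim_ definition above) =====
theorem solution_spec : Claim_equal_solution := by
  intro l r hdom
  have hr : r ≤ 2 ^ 31 := by
    simp only [Dom_solution, pvDomInt, Bool.and_eq_true, decide_eq_true_eq] at hdom
    have := hdom.2.2
    norm_num at this ⊢
    omega
  unfold Spec_solution solution solution_alt
  rw [loops_agree l r hr]
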